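-- pv_equiv track=rewrite | github.com/cocsmin/ubb | Semestrul 1/Fundamentele Programării/lab3.py | cautare_secventa2
-- ===== SOURCE A (Python) =====
-- def repetitie(x,y,z):
--     '''
--     O functie ce verifica daca cel putin 2 din 3 valori sunt identice
--     '''
--     if x == y:
--         return True
--     if y == z:
--         return True
--     if x == z:
--         return True
--     return False
--
-- def cautare_secventa2(lst):
--     '''
--     Functia care rezolva cerinta de la optiunea 2
--     '''
--     secventa_maxima = []
--     secventa_curenta = []
--     for i in range(len(lst) - 2):
--         if repetitie(lst[i],lst[i + 1],lst[i + 2]) or repetitie(lst[i],lst[i - 1],lst[i - 2]):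
--             secventa_curenta.append(lst[i])
--         else:
--             if len(secventa_curenta) > len(secventa_maxima):
--                 secventa_maxima = secventa_curenta
--             secventa_curenta = []
--     if len(secventa_curenta) > len(secventa_maxima):
--         secventa_maxima = secventa_curenta
--     return secventa_maxima
-- ===== SOURCE B (Python) =====
-- def repetitie(x, y, z):
--     '''
--     O functie ce verifica daca cel putin 2 din 3 valori sunt identice
--     '''
--     if x == y:
--         return True
--     if y == z:
--         return True
--     if x == z:
--         return True
--     return False
--
--
-- def cautare_secventa2(lst):
--     '''
--     Two-phase version: first materialize the flag table, then scan it
--     run by run (first strictly longer run wins). The pair list is consumed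
--     as a stack (pop from the end) so the scan is linear.
--     '''
--     n = len(lst)
--     flags = [repetitie(lst[i], lst[i + 1], lst[i + 2])
--              or repetitie(lst[i], lst[i - 1], lst[i - 2])
--              for i in range(n - 2)]
--     stack = list(zip(flags, lst))
--     stack.reverse()
--     best = []
--     while stack:
--         if stack[-1][0]:
--             run = []
--             while stack and stack[-1][0]:
--                 run.append(stack.pop()[1])
--             if len(run) > len(best):
--                 best = run
--         else:
--             stack.pop()
--     return best
-- ===== Notes on version B (the rewrite author's own statement) =====
-- stated objective: alternative
-- what changed: A keeps a running current-sequence/best-sequence accumulator pair inside one indexed loop; B first materializes the whole flag table, zips it with the values, and then detects maximal runs of consecutive True flags by splitting off one whole run at a time from a stack of pairs, keeping the first strictly longer run.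
import Mathlib
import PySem

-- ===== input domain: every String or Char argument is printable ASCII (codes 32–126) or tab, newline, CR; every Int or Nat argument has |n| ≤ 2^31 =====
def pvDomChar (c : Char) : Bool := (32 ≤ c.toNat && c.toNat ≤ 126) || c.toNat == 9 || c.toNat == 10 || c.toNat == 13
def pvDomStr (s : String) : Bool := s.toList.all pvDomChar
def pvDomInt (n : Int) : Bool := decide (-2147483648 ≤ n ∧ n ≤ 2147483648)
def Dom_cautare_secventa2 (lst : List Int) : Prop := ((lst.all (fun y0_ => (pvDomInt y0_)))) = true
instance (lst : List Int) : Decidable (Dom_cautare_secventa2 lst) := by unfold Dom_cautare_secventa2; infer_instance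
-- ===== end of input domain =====

-- B materializes the flag table and zips it with the values, then scans run by run (first strictly longer run wins), instead of A's single indexed loop with a running current/best accumulator pair; alternative decomposition, same results.


-- ===== PORT A =====
def repetitieL (x y z : Int) : Bool :=
  if x == y then true
  else if y == z then true
  else if x == z then true
  else false

-- the flag tested for index i (shared text of both Pythons; lst[i-1]/lst[i-2] wrap around as in Python)
def flagAt (lst : List Int) (i : Int) : Bool :=
  repetitieL (PySem.List.pyGetD lst i 0) (PySem.List.pyGetD lst (i + 1) 0) (PySem.List.pyGetD lst (i + 2) 0)
    || repetitieL (PySem.List.pyGetD lst i 0) (PySem.List.pyGetD lst (i - 1) 0) (PySem.List.pyGetD lst (i - 2) 0)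

def cautare_secventa2 (lst : List Int) : List Int :=
  let r := (PySem.List.pyRange 0 ((lst.length : Int) - 2) 1).foldl
    (fun (st : List Int × List Int) i =>
      if flagAt lst i then
        (st.1, st.2 ++ [PySem.List.pyGetD lst i 0])
      else if st.2.length > st.1.length then (st.2, ([] : List Int)) else (st.1, []))
    ([], [])
  if r.2.length > r.1.length then r.2 else r.1

-- ===== PORT B =====
-- B's stack holds the pairs reversed, with the top at the python list's end; we model the
-- stack top-at-head, so the reversal cancels and the scan consumes the zip list front-first.
-- takeRun is the inner while loop of B: split the leading run of True-flagged values off the stack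
def takeRun : List (Bool × Int) → List Int × List (Bool × Int)
  | [] => ([], [])
  | (f, v) :: t => if f then (v :: (takeRun t).1, (takeRun t).2) else ([], (f, v) :: t)

theorem takeRun_snd_length_le (l : List (Bool × Int)) : (takeRun l).2.length ≤ l.length := by
  induction l with
  | nil => simp [takeRun]
  | cons p t ih =>
    obtain ⟨f, v⟩ := p
    by_cases hf : f = true
    · simp [takeRun, hf]
      omega
    · simp [takeRun, hf]

-- the outer while loop of B
def bestOf : List (Bool × Int) → List Int → List Int
  | [], best => best
  | (true, v) :: t, best =>
      let run := v :: (takeRun t).1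
      bestOf (takeRun t).2 (if run.length > best.length then run else best)
  | (false, _) :: t, best => bestOf t best
  termination_by l _ => l.length
  decreasing_by
    · exact Nat.lt_succ_of_le (takeRun_snd_length_le t)
    · simp

def cautare_secventa2_alt (lst : List Int) : List Int :=
  let flags := (PySem.List.pyRange 0 ((lst.length : Int) - 2) 1).map (fun i => flagAt lst i)
  bestOf (flags.zip lst) []

-- ===== PRECONDITION & SPEC =====
def Spec_cautare_secventa2 (lst : List Int) (out : List Int) : Prop := out = cautare_secventa2_alt lst
instance (lst : List Int) (out : List Int) : Decidable (Spec_cautare_secventa2 lst out) := by unfold Spec_cautare_secventa2; infer_instance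

-- ===== CLAIM (what is proved, stated in full; the proofs are below) =====
def Claim_equal_cautare_secventa2 : Prop := ∀ (lst : List Int), Dom_cautare_secventa2 lst → Spec_cautare_secventa2 lst (cautare_secventa2 lst)

-- ===== LEMMAS AND PROOFS =====

-- A's loop step and final comparison, on (flag, value) pairs
def stepPair (st : List Int × List Int) (p : Bool × Int) : List Int × List Int :=
  if p.1 then (st.1, st.2 ++ [p.2])
  else if st.2.length > st.1.length then (st.2, ([] : List Int)) else (st.1, [])

def finalize (st : List Int × List Int) : List Int :=
  if st.2.length > st.1.length then st.2 else st.1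

theorem bestOf_takeRun (t : List (Bool × Int)) (b : List Int) :
    bestOf (takeRun t).2 (if (takeRun t).1.length > b.length then (takeRun t).1 else b) = bestOf t b := by
  match t with
  | [] => simp [takeRun, bestOf]
  | (true, v) :: t' => simp [takeRun, bestOf]
  | (false, v) :: t' => simp [takeRun, bestOf]

theorem foldl_stepPair_eq_bestOf (P : List (Bool × Int)) (mx cur : List Int) :
    finalize (P.foldl stepPair (mx, cur)) =
      bestOf (takeRun P).2
        (if (cur ++ (takeRun P).1).length > mx.length then cur ++ (takeRun P).1 else mx) := by
  induction P generalizing mx cur with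
  | nil => simp [takeRun, bestOf, finalize]
  | cons p t ih =>
    obtain ⟨f, v⟩ := p
    cases f with
    | true =>
      have h1 : (((true, v) :: t).foldl stepPair (mx, cur)) = t.foldl stepPair (mx, cur ++ [v]) := by
        simp [stepPair]
      rw [h1, ih]
      simp [takeRun, List.append_assoc]
    | false =>
      have h1 : (((false, v) :: t).foldl stepPair (mx, cur)) =
          t.foldl stepPair ((if cur.length > mx.length then cur else mx), []) := by
        by_cases h : cur.length > mx.length <;> simp [stepPair, h]
      rw [h1, ih]
      simp only [List.nil_append]
      rw [bestOf_takeRun]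
      simp [takeRun, bestOf]

theorem zip_flags_eq_map (lst : List Int) :
    (((PySem.List.pyRange 0 ((lst.length : Int) - 2) 1).map (fun i => flagAt lst i)).zip lst) =
      (PySem.List.pyRange 0 ((lst.length : Int) - 2) 1).map
        (fun i => (flagAt lst i, PySem.List.pyGetD lst i 0)) := by
  apply List.ext_getElem
  · simp [List.length_zip, PySem.List.length_pyRange_one]
  · intro i h1 h2
    have hi : i < ((lst.length : Int) - 2).toNat := by
      simpa [List.length_zip, PySem.List.length_pyRange_one] using h1
    have hil : i < lst.length := by omega
    rw [List.getElem_zip]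
    simp only [List.getElem_map, PySem.List.getElem_pyRange_one]
    refine Prod.ext rfl ?_
    rw [PySem.List.pyGetD_eq_getElem lst 0 (by omega) (by omega)]
    simp only []
    congr 1
    omega

theorem cautare_secventa2_eq_foldl_pairs (lst : List Int) :
    cautare_secventa2 lst =
      finalize ((((PySem.List.pyRange 0 ((lst.length : Int) - 2) 1).map (fun i => flagAt lst i)).zip lst).foldl
        stepPair ([], [])) := by
  rw [zip_flags_eq_map, List.foldl_map]
  simp only [cautare_secventa2, finalize, stepPair]

theorem cautare_secventa2_spec' (lst : List Int) :
    cautare_secventa2 lst = cautare_secventa2_alt lst := by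
  rw [cautare_secventa2_eq_foldl_pairs, foldl_stepPair_eq_bestOf]
  simp only [List.nil_append]
  rw [bestOf_takeRun]
  rfl

-- ===== VERDICT (by name: the statement is the Claim_ definition above) =====
theorem cautare_secventa2_spec : Claim_equal_cautare_secventa2 := by
  intro lst _
  unfold Spec_cautare_secventa2
  exact cautare_secventa2_spec' lst
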